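-- pv_equiv track=rewrite | github.com/Med-Time/GA_Timetable | ga.py | _build_day_order_and_tsindex_map
-- ===== SOURCE A (Python) =====
-- def _build_day_order_and_tsindex_map(timeslots):
--     """
--     Build:
--      - day_periods: dict day -> list of (period_label, ts_idx) in appearance order
--      - tsidx_to_order: dict ts_idx -> (day, order_index_within_day)
--     """
--     day_periods = {}
--     for ts_idx, label in enumerate(timeslots):
--         if "_" in label:
--             day, period = label.split("_", 1)
--         elif "-" in label:
--             day, period = label.split("-", 1)
--         else:
--             parts = label.split(" ", 1)
--             day = parts[0]
--             period = parts[1] if len(parts) > 1 else ""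
--         day_periods.setdefault(day, []).append((period, ts_idx))
--     tsidx_to_order = {}
--     for d in day_periods:
--         # already in appearance order by ts_idx, but ensure sort by ts_idx
--         day_periods[d].sort(key=lambda x: x[1])
--         for order, (_p, tsidx) in enumerate(day_periods[d]):
--             tsidx_to_order[tsidx] = (d, order)
--     return day_periods, tsidx_to_order
-- ===== SOURCE B (Python) =====
-- def _parse(label):
--     if "_" in label:
--         day, period = label.split("_", 1)
--     elif "-" in label:
--         day, period = label.split("-", 1)
--     else:
--         parts = label.split(" ", 1)
--         day = parts[0]
--         period = parts[1] if len(parts) > 1 else ""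
--     return day, period
--
--
-- def _build_day_order_and_tsindex_map(timeslots):
--     # parse every label once
--     parsed = [_parse(label) for label in timeslots]
--     # distinct days in first-appearance order
--     days = list(dict.fromkeys(day for day, _period in parsed))
--     # group by scanning the parsed list once per day (no incremental setdefault dict, no sort:
--     # enumerate indices are already increasing)
--     day_periods = {}
--     for d in days:
--         day_periods[d] = [(p, i) for i, (dd, p) in enumerate(parsed) if dd == d]
--     tsidx_to_order = {}
--     for d in days:
--         for order, (_p, i) in enumerate(day_periods[d]):
--             tsidx_to_order[i] = (d, order)
--     return day_periods, tsidx_to_order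
-- ===== Notes on version B (the rewrite author's own statement) =====
-- stated objective: alternative
-- what changed: B replaces A's incremental setdefault-dict grouping with per-day re-sort by a staged pipeline: parse all labels once, dedup the days with dict.fromkeys, then build each day's list by filtering the parsed list per day and fill tsidx_to_order from those lists, with no sort and no in-place dict update.
import Mathlib
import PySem

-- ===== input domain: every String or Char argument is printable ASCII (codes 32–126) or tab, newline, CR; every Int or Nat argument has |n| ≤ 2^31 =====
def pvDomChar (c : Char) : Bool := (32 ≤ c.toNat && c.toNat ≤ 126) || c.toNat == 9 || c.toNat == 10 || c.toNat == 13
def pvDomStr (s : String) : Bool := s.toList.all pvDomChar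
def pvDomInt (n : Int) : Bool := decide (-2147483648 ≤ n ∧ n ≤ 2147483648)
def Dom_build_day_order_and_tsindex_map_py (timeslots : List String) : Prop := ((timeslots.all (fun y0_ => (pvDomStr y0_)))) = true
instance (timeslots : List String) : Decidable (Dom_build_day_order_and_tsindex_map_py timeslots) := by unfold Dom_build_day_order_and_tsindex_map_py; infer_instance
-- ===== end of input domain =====

-- B is an alternative decomposition of the same task: parse all labels once, dedup the days with
-- dict.fromkeys, then build each day's list by FILTERING the parsed list per day (scan per day,
-- no incremental setdefault dict, no sort) and fill tsidx_to_order from those lists.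

-- ===== PORT A =====
-- Literal port of _build_day_order_and_tsindex_map (Source A).
-- 'day, period = label.split(sep, 1)' is ported as parts.getD 0 "" / parts.getD 1 "": when sep is in
-- label, split(sep, 1) returns exactly two parts, so the unpacking never raises and getD is exact.
def build_day_order_and_tsindex_map_py (timeslots : List String) : (List (String × List (String × Int))) × (List (Int × String × Int)) :=
  let day_periods : PySem.Dict String (List (String × Int)) :=
    (PySem.List.enumerate timeslots).foldl
      (fun dp p =>
        let dayPeriod : String × String :=
          if PySem.Str.isIn "_" p.2 then
            let parts := (PySem.Str.splitMax? p.2 "_" 1).getD []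
            (parts.getD 0 "", parts.getD 1 "")
          else if PySem.Str.isIn "-" p.2 then
            let parts := (PySem.Str.splitMax? p.2 "-" 1).getD []
            (parts.getD 0 "", parts.getD 1 "")
          else
            let parts := (PySem.Str.splitMax? p.2 " " 1).getD []
            (parts.getD 0 "", if 1 < parts.length then parts.getD 1 "" else "")
        -- day_periods.setdefault(day, []).append((period, ts_idx))
        dp.modify dayPeriod.1 [] (fun v => v ++ [(dayPeriod.2, p.1)]))
      PySem.Dict.empty
  let st :=
    day_periods.keys.foldl
      (fun (st : PySem.Dict String (List (String × Int)) × PySem.Dict Int (String × Int)) d =>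
        -- day_periods[d].sort(key=lambda x: x[1])
        let sortedLst := PySem.List.sorted (st.1.getD d []) (fun x => x.2)
        let dp' := st.1.insert d sortedLst
        -- for order, (_p, tsidx) in enumerate(day_periods[d]): tsidx_to_order[tsidx] = (d, order)
        let tso := (PySem.List.enumerate sortedLst).foldl
          (fun t e => t.insert e.2.2 (d, e.1)) st.2
        (dp', tso))
      (day_periods, (PySem.Dict.empty : PySem.Dict Int (String × Int)))
  (st.1.items, st.2.items)

-- ===== PORT B =====
-- _parse of Source B (A's three branch forms, as a helper returning the (day, period) pair)
def pvParse (label : String) : String × String :=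
  if PySem.Str.isIn "_" label then
    let parts := (PySem.Str.splitMax? label "_" 1).getD []
    (parts.getD 0 "", parts.getD 1 "")
  else if PySem.Str.isIn "-" label then
    let parts := (PySem.Str.splitMax? label "-" 1).getD []
    (parts.getD 0 "", parts.getD 1 "")
  else
    let parts := (PySem.Str.splitMax? label " " 1).getD []
    (parts.getD 0 "", if 1 < parts.length then parts.getD 1 "" else "")

def build_day_order_and_tsindex_map_py_alt (timeslots : List String) : (List (String × List (String × Int))) × (List (Int × String × Int)) :=
  -- parsed = [_parse(label) for label in timeslots]
  let parsed := timeslots.map pvParse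
  -- days = list(dict.fromkeys(day for day, _period in parsed))
  let days := PySem.List.dedup (parsed.map (fun dp => dp.1))
  -- for d in days: day_periods[d] = [(p, i) for i, (dd, p) in enumerate(parsed) if dd == d]
  let day_periods : PySem.Dict String (List (String × Int)) :=
    days.foldl
      (fun dp d =>
        dp.insert d (((PySem.List.enumerate parsed).filter (fun e => e.2.1 == d)).map (fun e => (e.2.2, e.1))))
      PySem.Dict.empty
  -- for d in days: for order, (_p, i) in enumerate(day_periods[d]): tsidx_to_order[i] = (d, order)
  let tsidx_to_order : PySem.Dict Int (String × Int) :=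
    days.foldl
      (fun t d => (PySem.List.enumerate (day_periods.getD d [])).foldl
        (fun t e => t.insert e.2.2 (d, e.1)) t)
      PySem.Dict.empty
  (day_periods.items, tsidx_to_order.items)

-- ===== PRECONDITION & SPEC =====
def Spec_build_day_order_and_tsindex_map_py (timeslots : List String) (out : (List (String × List (String × Int))) × (List (Int × String × Int))) : Prop := out = build_day_order_and_tsindex_map_py_alt timeslots
instance (timeslots : List String) (out : (List (String × List (String × Int))) × (List (Int × String × Int))) : Decidable (Spec_build_day_order_and_tsindex_map_py timeslots out) := by unfold Spec_build_day_order_and_tsindex_map_py; infer_instance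

-- ===== CLAIM (what is proved, stated in full; the proofs are below) =====
def Claim_equal_build_day_order_and_tsindex_map_py : Prop := ∀ (timeslots : List String), Dom_build_day_order_and_tsindex_map_py timeslots → Spec_build_day_order_and_tsindex_map_py timeslots (build_day_order_and_tsindex_map_py timeslots)

-- ===== LEMMAS AND PROOFS =====

-- enumerate commutes with map
lemma pvEnumMap (xs : List String) : ∀ (s : Int),
    PySem.List.enumerate (xs.map pvParse) s
      = (PySem.List.enumerate xs s).map (fun p => (p.1, pvParse p.2)) := by
  induction xs with
  | nil => intro s; simp [PySem.List.enumerate_nil]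
  | cons x xs ih => intro s; simp [PySem.List.enumerate_cons, ih]

-- the pairs A's first loop folds over, as (day, (period, ts_idx))
def pvL (timeslots : List String) : List (String × String × Int) :=
  (PySem.List.enumerate (timeslots.map pvParse)).map (fun e => (e.2.1, e.2.2, e.1))

-- the phase-1 dict (both programs' grouping target)
def pvDP (timeslots : List String) : PySem.Dict String (List (String × Int)) :=
  (pvL timeslots).foldl (fun d p => d.modify p.1 [] (fun v => v ++ [p.2])) PySem.Dict.empty

-- B's per-day scan result
def pvMatches (timeslots : List String) (d : String) : List (String × Int) :=
  ((PySem.List.enumerate (timeslots.map pvParse)).filter (fun e => e.2.1 == d)).map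
    (fun e => (e.2.2, e.1))

-- B's days list
def pvDays (timeslots : List String) : List String :=
  PySem.List.dedup ((timeslots.map pvParse).map (fun dp => dp.1))

lemma pvAfold_eq (timeslots : List String) :
    (PySem.List.enumerate timeslots).foldl
      (fun dp p => dp.modify (pvParse p.2).1 [] (fun v => v ++ [((pvParse p.2).2, p.1)]))
      PySem.Dict.empty = pvDP timeslots := by
  unfold pvDP pvL
  rw [pvEnumMap]
  simp [List.foldl_map]

lemma pvKeys (timeslots : List String) : (pvDP timeslots).keys = pvDays timeslots := by
  unfold pvDP pvDays
  rw [PySem.Dict.keys_foldl_modify_key]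
  have hmap : (PySem.List.enumerate (timeslots.map pvParse)).map (fun x => x.2.1)
      = (timeslots.map pvParse).map (fun dp => dp.1) := by
    rw [show (fun x : Int × String × String => x.2.1)
          = (fun dp : String × String => dp.1) ∘ (fun x : Int × String × String => x.2) from rfl,
        ← List.map_map, PySem.List.map_snd_enumerate]
  simp [pvL, PySem.Set.update, PySem.Set.ofList_eq_foldl, PySem.Dict.keys, PySem.Dict.empty,
    List.map_map, Function.comp_def, PySem.List.dedup_eq_ofList]
  rw [hmap]
  simp [List.map_map, Function.comp_def]

lemma pvNodupKeys (timeslots : List String) : (pvDP timeslots).keys.Nodup := by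
  rw [pvKeys]
  unfold pvDays
  simp [PySem.List.dedup_eq_ofList, PySem.Set.nodup_ofList]

lemma pvGetD (timeslots : List String) (d : String) :
    (pvDP timeslots).getD d [] = pvMatches timeslots d := by
  unfold pvDP pvMatches pvL
  rw [PySem.Dict.getD_foldl_modify_append]
  simp [List.filter_map, List.map_map, Function.comp_def]

lemma pvMatches_pairwise (timeslots : List String) (d : String) :
    List.Pairwise (fun a b : String × Int => a.2 < b.2) (pvMatches timeslots d) := by
  unfold pvMatches
  rw [List.pairwise_map]
  exact (PySem.List.pairwise_lt_enumerate _ _).filter _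

lemma pvInsert_getD_self {κ ν : Type} [BEq κ] [LawfulBEq κ] (d : PySem.Dict κ ν) (k : κ) (d0 : ν)
    (hnd : d.keys.Nodup) (hk : d.contains k = true) : d.insert k (d.getD k d0) = d := by
  apply PySem.Dict.ext
  rw [PySem.Dict.items_insert_of_contains _ _ hk]
  have hid : ∀ p ∈ d.items, (if (p.1 == k) = true then (k, d.getD k d0) else p) = p := by
    intro p hp
    by_cases hkk : (p.1 == k) = true
    · have hkeq : p.1 = k := by simpa using hkk
      have hgd : d.getD k d0 = p.2 := by
        have : (k, p.2) ∈ d.items := by rw [← hkeq]; simpa using hp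
        exact PySem.Dict.getD_of_mem_items d this hnd d0
      rw [if_pos hkk, hgd, ← hkeq]
    · rw [if_neg hkk]
  rw [List.map_congr_left hid]
  simp

-- A's second loop: the sort is the identity and day_periods is unchanged
lemma pvLoopA (dp : PySem.Dict String (List (String × Int))) (hnd : dp.keys.Nodup)
    (hs : ∀ kv ∈ dp.items, List.Pairwise (fun a b : String × Int => a.2 < b.2) kv.2) :
    ∀ (ks : List String), (∀ d ∈ ks, d ∈ dp.keys) →
      ∀ (tso : PySem.Dict Int (String × Int)),
        ks.foldl
          (fun (st : PySem.Dict String (List (String × Int)) × PySem.Dict Int (String × Int)) d =>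
            let sortedLst := PySem.List.sorted (st.1.getD d []) (fun x => x.2)
            let dp' := st.1.insert d sortedLst
            let tso := (PySem.List.enumerate sortedLst).foldl
              (fun t e => t.insert e.2.2 (d, e.1)) st.2
            (dp', tso))
          (dp, tso)
        = (dp, ks.foldl
            (fun t d => (PySem.List.enumerate (dp.getD d [])).foldl
              (fun t e => t.insert e.2.2 (d, e.1)) t) tso) := by
  intro ks
  induction ks with
  | nil => intro _ tso; rfl
  | cons d ks ih =>
    intro hmem tso
    have hd : d ∈ dp.keys := hmem d (by simp)
    have hc : dp.contains d = true := (PySem.Dict.contains_iff_mem_keys dp d).mpr hd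
    have hpair : List.Pairwise (fun a b : String × Int => a.2 ≤ b.2) (dp.getD d []) := by
      cases hg : dp.get? d with
      | none => simp [PySem.Dict.getD_eq_get?_getD, hg]
      | some v =>
        have hv : (d, v) ∈ dp.items := (PySem.Dict.get?_eq_some_iff_mem_items dp d v hnd).mp hg
        have := hs _ hv
        simp only [PySem.Dict.getD_eq_get?_getD, hg, Option.getD_some]
        exact this.imp (fun h => le_of_lt h)
    have hsort : PySem.List.sorted (dp.getD d []) (fun x : String × Int => x.2) = dp.getD d [] :=
      PySem.List.sorted_eq_self_of_pairwise _ _ hpair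
    simp only [List.foldl_cons]
    rw [hsort, pvInsert_getD_self dp d [] hnd hc]
    exact ih (fun x hx => hmem x (List.mem_cons_of_mem _ hx)) _

-- the items of the phase-1 dict are the per-day scans, over the dedup'd days
lemma pvItems (timeslots : List String) :
    (pvDP timeslots).items = (pvDays timeslots).map (fun d => (d, pvMatches timeslots d)) := by
  rw [PySem.Dict.items_eq_map_keys _ (pvNodupKeys timeslots) ([] : List (String × Int)), pvKeys]
  exact List.map_congr_left (fun d _ => by rw [pvGetD])

-- B's day_periods dict: distinct fresh keys, so its items are exactly that map too
lemma pvItemsB (timeslots : List String) :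
    ((pvDays timeslots).foldl
      (fun dp d => dp.insert d (pvMatches timeslots d))
      (PySem.Dict.empty : PySem.Dict String (List (String × Int)))).items
    = (pvDays timeslots).map (fun d => (d, pvMatches timeslots d)) := by
  rw [PySem.Dict.items_foldl_insert_fresh]
  · simp [PySem.Dict.empty]
  · intro a _; exact PySem.Dict.contains_empty a
  · simp only [List.map_id']
    unfold pvDays
    simp [PySem.List.dedup_eq_ofList, PySem.Set.nodup_ofList]

lemma pvGetDB (timeslots : List String) (d : String) (hd : d ∈ pvDays timeslots) :
    ((pvDays timeslots).foldl
      (fun dp d => dp.insert d (pvMatches timeslots d))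
      (PySem.Dict.empty : PySem.Dict String (List (String × Int)))).getD d []
    = pvMatches timeslots d := by
  apply PySem.Dict.getD_of_mem_items
  · rw [pvItemsB]; exact List.mem_map.mpr ⟨d, hd, rfl⟩
  · show List.Nodup (PySem.Dict.keys _)
    rw [PySem.Dict.keys, pvItemsB]
    simp only [List.map_map, Function.comp_def, List.map_id']
    unfold pvDays
    simp [PySem.List.dedup_eq_ofList, PySem.Set.nodup_ofList]

-- A's second phase, abstracted over the phase-1 dict (proof-side name for A's tail)
def pvPhase2A (dp : PySem.Dict String (List (String × Int))) :
    (List (String × List (String × Int))) × (List (Int × String × Int)) :=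
  let st :=
    dp.keys.foldl
      (fun (st : PySem.Dict String (List (String × Int)) × PySem.Dict Int (String × Int)) d =>
        let sortedLst := PySem.List.sorted (st.1.getD d []) (fun x => x.2)
        let dp' := st.1.insert d sortedLst
        let tso := (PySem.List.enumerate sortedLst).foldl
          (fun t e => t.insert e.2.2 (d, e.1)) st.2
        (dp', tso))
      (dp, (PySem.Dict.empty : PySem.Dict Int (String × Int)))
  (st.1.items, st.2.items)

-- ===== VERDICT (by name: the statement is the Claim_ definition above) =====
theorem build_day_order_and_tsindex_map_py_spec : Claim_equal_build_day_order_and_tsindex_map_py := by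
  intro timeslots _
  unfold Spec_build_day_order_and_tsindex_map_py
  have hA : build_day_order_and_tsindex_map_py timeslots = pvPhase2A (pvDP timeslots) := by
    rw [← pvAfold_eq]; rfl
  have hB : build_day_order_and_tsindex_map_py_alt timeslots
      = (((pvDays timeslots).foldl (fun dp d => dp.insert d (pvMatches timeslots d))
            (PySem.Dict.empty : PySem.Dict String (List (String × Int)))).items,
         ((pvDays timeslots).foldl (fun t d =>
            (PySem.List.enumerate
                (((pvDays timeslots).foldl (fun dp d => dp.insert d (pvMatches timeslots d))
                    (PySem.Dict.empty : PySem.Dict String (List (String × Int)))).getD d [])).foldl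
              (fun t e => t.insert e.2.2 (d, e.1)) t)
            (PySem.Dict.empty : PySem.Dict Int (String × Int))).items) := rfl
  rw [hA, hB]
  have hnd := pvNodupKeys timeslots
  have hs : ∀ kv ∈ (pvDP timeslots).items,
      List.Pairwise (fun a b : String × Int => a.2 < b.2) kv.2 := by
    intro kv hkv
    have : (pvDP timeslots).getD kv.1 [] = kv.2 :=
      PySem.Dict.getD_of_mem_items _ (by exact hkv) hnd []
    rw [← this, pvGetD]
    exact pvMatches_pairwise timeslots kv.1
  unfold pvPhase2A
  rw [pvLoopA (pvDP timeslots) hnd hs (pvDP timeslots).keys (fun d hd => hd)]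
  refine Prod.ext ?_ ?_
  · show (pvDP timeslots).items = _
    rw [pvItems, ← pvItemsB]
  · show PySem.Dict.items _ = PySem.Dict.items _
    congr 1
    rw [pvKeys]
    apply PySem.List.foldl_congr_mem
    intro acc d hd
    rw [pvGetD, ← pvGetDB timeslots d hd]
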